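-- pv_equiv track=rewrite | github.com/yu-jiyu-jiyu-jiyu-ji/nittei_chosei_system | services/candidate_search_service.py | _bounded_worker_pool_size
-- ===== SOURCE A (Python) =====
-- def _n_choose_k_exceeds(n: int, k: int, threshold: int) -> bool:
--     """nCk が threshold を超えるかを途中打ち切りで判定する。"""
--     if threshold <= 0:
--         return True
--     if k < 0 or n < 0 or k > n:
--         return False
--     k = min(k, n - k)
--     if k == 0:
--         return 1 > threshold
--     result = 1
--     for i in range(1, k + 1):
--         result = (result * (n - k + i)) // i
--         if result > threshold:
--             return True
--     return False
--
-- def _bounded_worker_pool_size(total_workers: int, headcount: int, max_combinations: int) -> int: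
--     """組み合わせ爆発を避けるため、探索対象にする職人母集団サイズを上限化する。"""
--     if total_workers <= headcount:
--         return total_workers
--     if max_combinations <= 0:
--         return total_workers
--     size = total_workers
--     while size > headcount and _n_choose_k_exceeds(size, headcount, max_combinations):
--         size -= 1
--     return max(headcount, size)
-- ===== SOURCE B (Python) =====
-- def _cnk_exceeds(n, k, threshold):
--     # Does C(n, k) exceed threshold?  (threshold >= 1; C(n,k)=0 outside 0<=k<=n.)
--     k = min(k, n - k)
--     result = 1
--     i = 1
--     while i <= k:
--         result = result * (n - k + i) // i
--         if result > threshold: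
--             return True
--         i += 1
--     return result > threshold
--
-- def _bounded_worker_pool_size(total_workers, headcount, max_combinations):
--     if total_workers <= headcount:
--         return total_workers
--     if max_combinations <= 0:
--         return total_workers
--     if not _cnk_exceeds(total_workers, headcount, max_combinations):
--         return total_workers
--     # C(size, headcount) is nondecreasing in size, so binary-search the largest
--     # size in [headcount, total_workers] with C(size, headcount) <= max_combinations.
--     lo, hi = headcount, total_workers  # invariant: C(lo,.) <= max < C(hi,.)
--     while hi - lo > 1:
--         mid = (lo + hi) // 2
--         if _cnk_exceeds(mid, headcount, max_combinations):
--             hi = mid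
--         else:
--             lo = mid
--     return lo
-- ===== Notes on version B (the rewrite author's own statement) =====
-- stated objective: faster
-- what changed: Replaces A's linear countdown of the pool size (decrementing by 1 while nCk exceeds the threshold) by a binary search over [headcount, total_workers] using the monotonicity of C(n,k) in n.
import Mathlib
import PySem

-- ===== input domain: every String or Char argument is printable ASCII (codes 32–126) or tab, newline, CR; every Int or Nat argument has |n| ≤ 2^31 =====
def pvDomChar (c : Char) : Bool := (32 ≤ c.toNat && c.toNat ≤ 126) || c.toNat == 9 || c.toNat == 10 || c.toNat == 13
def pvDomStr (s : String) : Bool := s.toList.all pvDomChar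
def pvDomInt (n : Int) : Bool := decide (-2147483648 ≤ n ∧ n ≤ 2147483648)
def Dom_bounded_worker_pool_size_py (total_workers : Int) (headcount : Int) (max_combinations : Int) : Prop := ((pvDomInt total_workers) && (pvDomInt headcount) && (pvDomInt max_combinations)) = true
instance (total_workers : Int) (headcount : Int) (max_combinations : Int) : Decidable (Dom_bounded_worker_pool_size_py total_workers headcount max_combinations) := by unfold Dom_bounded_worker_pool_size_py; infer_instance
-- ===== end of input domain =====

-- B replaces A's linear countdown of the pool size by a binary search over
-- [headcount, total_workers] (C(n,k) is nondecreasing in n); objective: faster.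

-- ===== PORT A =====
-- the 'for i in range(1, k+1)' loop of _n_choose_k_exceeds, with early 'return True'
def pvLoopA (n k threshold : Int) (i result : Int) : Bool :=
  if _h : i ≤ k then
    let r := PySem.Int.floordiv (result * (n - k + i)) i
    if r > threshold then true
    else pvLoopA n k threshold (i + 1) r
  else false
termination_by (k + 1 - i).toNat
decreasing_by omega

def pvNCKExceeds (n k threshold : Int) : Bool :=
  if threshold ≤ 0 then true
  else if k < 0 ∨ n < 0 ∨ k > n then false
  else
    let k' := min k (n - k)
    if k' = 0 then decide ((1 : Int) > threshold)
    else pvLoopA n k' threshold 1 1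

-- the 'while size > headcount and _n_choose_k_exceeds(...)' loop
def pvWhileA (headcount max_combinations : Int) (size : Int) : Int :=
  if _h : size > headcount ∧ pvNCKExceeds size headcount max_combinations = true then
    pvWhileA headcount max_combinations (size - 1)
  else size
termination_by (size - headcount).toNat
decreasing_by omega

def bounded_worker_pool_size_py (total_workers : Int) (headcount : Int) (max_combinations : Int) : Int :=
  if total_workers ≤ headcount then total_workers
  else if max_combinations ≤ 0 then total_workers
  else max headcount (pvWhileA headcount max_combinations total_workers)

-- ===== PORT B =====
-- the 'while i <= k' loop of _cnk_exceeds (final 'return result > threshold')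
def pvLoopB (n k threshold : Int) (i result : Int) : Bool :=
  if _h : i ≤ k then
    let r := PySem.Int.floordiv (result * (n - k + i)) i
    if r > threshold then true
    else pvLoopB n k threshold (i + 1) r
  else decide (result > threshold)
termination_by (k + 1 - i).toNat
decreasing_by omega

def pvCnkExceeds (n k threshold : Int) : Bool :=
  pvLoopB n (min k (n - k)) threshold 1 1

-- the binary-search 'while hi - lo > 1' loop
def pvBSearch (headcount max_combinations : Int) (lo hi : Int) : Int :=
  if _h : hi - lo > 1 then
    let mid := PySem.Int.floordiv (lo + hi) 2
    if pvCnkExceeds mid headcount max_combinations then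
      pvBSearch headcount max_combinations lo mid
    else
      pvBSearch headcount max_combinations mid hi
  else lo
termination_by (hi - lo).toNat
decreasing_by
  · rw [PySem.Int.floordiv_eq_ediv_of_pos (by norm_num)] at *; omega
  · rw [PySem.Int.floordiv_eq_ediv_of_pos (by norm_num)] at *; omega

def bounded_worker_pool_size_py_alt (total_workers : Int) (headcount : Int) (max_combinations : Int) : Int :=
  if total_workers ≤ headcount then total_workers
  else if max_combinations ≤ 0 then total_workers
  else if pvCnkExceeds total_workers headcount max_combinations = false then total_workers
  else pvBSearch headcount max_combinations headcount total_workers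

-- ===== PRECONDITION & SPEC =====
def Spec_bounded_worker_pool_size_py (total_workers : Int) (headcount : Int) (max_combinations : Int) (out : Int) : Prop := out = bounded_worker_pool_size_py_alt total_workers headcount max_combinations
instance (total_workers : Int) (headcount : Int) (max_combinations : Int) (out : Int) : Decidable (Spec_bounded_worker_pool_size_py total_workers headcount max_combinations out) := by unfold Spec_bounded_worker_pool_size_py; infer_instance

-- ===== CLAIM (what is proved, stated in full; the proofs are below) =====
def Claim_equal_bounded_worker_pool_size_py : Prop := ∀ (total_workers : Int) (headcount : Int) (max_combinations : Int), Dom_bounded_worker_pool_size_py total_workers headcount max_combinations → Spec_bounded_worker_pool_size_py total_workers headcount max_combinations (bounded_worker_pool_size_py total_workers headcount max_combinations)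

-- ===== LEMMAS AND PROOFS =====

-- C(n,k) as the Python code sees it on Int arguments (0 outside 0 ≤ k ≤ n)
def chooseZ (n k : Int) : ℕ :=
  if 0 ≤ k ∧ k ≤ n then Nat.choose n.toNat k.toNat else 0

lemma choose_add_le (m i d : ℕ) : Nat.choose m i ≤ Nat.choose (m + d) (i + d) := by
  induction d with
  | zero => simp
  | succ d ih =>
      calc Nat.choose m i ≤ Nat.choose (m + d) (i + d) := ih
        _ ≤ Nat.choose (m + d + 1) (i + d + 1) := by
              rw [Nat.choose_succ_succ]; omega

-- the two inner loops agree while the running result is ≤ threshold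
lemma loopAB (m : ℕ) : ∀ n k t i result : Int, (k + 1 - i).toNat = m → result ≤ t →
    pvLoopA n k t i result = pvLoopB n k t i result := by
  induction m with
  | zero =>
      intro n k t i result hm h
      rw [pvLoopA, pvLoopB, dif_neg (by omega), dif_neg (by omega)]
      simp; omega
  | succ m ih =>
      intro n k t i result hm h
      rw [pvLoopA, pvLoopB]
      by_cases hik : i ≤ k
      · by_cases hr : PySem.Int.floordiv (result * (n - k + i)) i > t
        · simp [hik, hr]
        · simp only [dif_pos hik, if_neg hr]
          exact ih n k t (i + 1) _ (by omega) (by omega)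
      · rw [dif_neg hik, dif_neg hik]
        simp; omega

-- exactness of loop A: with state C(n-k+j, j) at entry j+1 it decides t < C(n,k)
lemma loopA_spec (n k t : ℕ) (hk : 1 ≤ k) (h2k : 2 * k ≤ n) (ht : 1 ≤ t) :
    ∀ j : ℕ, j < k → Nat.choose (n - k + j) j ≤ t →
    pvLoopA (n : Int) (k : Int) (t : Int) ((j : Int) + 1) ((Nat.choose (n - k + j) j : ℕ) : Int)
      = decide ((t : ℕ) < Nat.choose n k) := by
  intro j
  induction hj : k - j generalizing j with
  | zero => intro hjk _; omega
  | succ m ih =>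
      intro hjk hle
      have hik : (j : Int) + 1 ≤ (k : Int) := by exact_mod_cast hjk
      rw [pvLoopA]
      simp only [hik, dif_pos]
      have hcast : (n : Int) - (k : Int) + ((j : Int) + 1) = ((n - k + j + 1 : ℕ) : ℤ) := by
        push_cast; omega
      have hkey : (Nat.choose (n - k + j) j : ℤ) * ((n - k + j + 1 : ℕ) : ℤ)
          = ((Nat.choose (n - k + j + 1) (j + 1) * (j + 1) : ℕ) : ℤ) := by
        have := Nat.succ_mul_choose_eq (n - k + j) j
        push_cast
        push_cast at this
        linarith [this]
      have hdiv : PySem.Int.floordiv ((Nat.choose (n - k + j) j : ℤ) * ((n - k + j + 1 : ℕ) : ℤ)) ((j : Int) + 1)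
          = (Nat.choose (n - k + j + 1) (j + 1) : ℤ) := by
        rw [hkey]
        rw [PySem.Int.floordiv_eq_ediv_of_pos (by positivity)]
        push_cast
        rw [Int.mul_ediv_cancel _ (by positivity)]
      rw [hcast, hdiv]
      by_cases hgt : (t : ℤ) < (Nat.choose (n - k + j + 1) (j + 1) : ℤ)
      · rw [if_pos (by exact_mod_cast hgt)]
        have hmono : Nat.choose (n - k + j + 1) (j + 1) ≤ Nat.choose n k := by
          have := choose_add_le (n - k + j + 1) (j + 1) (k - (j + 1))
          have he1 : n - k + j + 1 + (k - (j + 1)) = n := by omega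
          have he2 : j + 1 + (k - (j + 1)) = k := by omega
          rw [he1, he2] at this; exact this
        have : (t : ℕ) < Nat.choose n k := by
          have : (t : ℕ) < Nat.choose (n - k + j + 1) (j + 1) := by exact_mod_cast hgt
          omega
        simp [this]
      · rw [if_neg (by exact_mod_cast hgt)]
        push_cast at hgt
        by_cases hlast : j + 1 < k
        · have := ih (j + 1) (by omega) hlast (by exact_mod_cast not_lt.mp hgt)
          have harg : ((j : Int) + 1) + 1 = ((j + 1 : ℕ) : ℤ) + 1 := by push_cast; ring
          rw [harg]; exact this
        · have hjk1 : j + 1 = k := by omega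
          rw [pvLoopA]
          have : ¬ ((j : Int) + 1 + 1 ≤ (k : Int)) := by
            have : (k : ℤ) = (j : ℤ) + 1 := by exact_mod_cast hjk1.symm
            omega
          simp only [this, dif_neg, not_false_iff]
          have hnk : Nat.choose n k = Nat.choose (n - k + j + 1) (j + 1) := by
            rw [hjk1]; congr 1; omega
          have : ¬ ((t : ℕ) < Nat.choose n k) := by
            rw [hnk]; exact_mod_cast hgt
          simp [this]

-- characterisation of A's helper for positive threshold
lemma exceeds_eq (s k t : Int) (ht : 1 ≤ t) :
    pvNCKExceeds s k t = decide (t < (chooseZ s k : Int)) := by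
  rw [pvNCKExceeds]
  rw [if_neg (by omega)]
  by_cases hbad : k < 0 ∨ s < 0 ∨ k > s
  · rw [if_pos hbad]
    have : chooseZ s k = 0 := by unfold chooseZ; rw [if_neg (by omega)]
    simp [this]; omega
  · rw [if_neg hbad]
    push_neg at hbad
    obtain ⟨hk0, hs0, hks⟩ := hbad
    have hch : chooseZ s k = Nat.choose s.toNat k.toNat := by
      unfold chooseZ; rw [if_pos ⟨hk0, hks⟩]
    by_cases hz : min k (s - k) = 0
    · rw [if_pos hz]
      have h1 : chooseZ s k = 1 := by
        rw [hch]
        rcases (by omega : k = 0 ∨ k = s) with h | h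
        · simp [h]
        · subst h; simp
      rw [h1]
      simp
    · rw [if_neg hz]
      have hk1 : 1 ≤ min k (s - k) := by omega
      set k' := min k (s - k) with hk'
      have h2k : 2 * k' ≤ s := by omega
      have hc : (s : Int) - k' = ((s.toNat - k'.toNat : ℕ) : ℤ) := by push_cast; omega
      have hspec := loopA_spec s.toNat k'.toNat t.toNat (by omega) (by omega) (by omega)
        0 (by omega) (by simp; omega)
      simp only [Nat.add_zero, Nat.choose_zero_right, Nat.cast_one, Nat.cast_zero, zero_add] at hspec
      have hrw : pvLoopA s k' t 1 1
          = pvLoopA (s.toNat : Int) (k'.toNat : Int) (t.toNat : Int) 1 1 := by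
        congr 1 <;> omega
      rw [hrw, hspec]
      have hkk : Nat.choose s.toNat k'.toNat = Nat.choose s.toNat k.toNat := by
        rcases (by omega : k' = k ∨ k' = s - k) with h | h
        · rw [h]
        · have : k'.toNat = s.toNat - k.toNat := by omega
          rw [this]
          exact Nat.choose_symm (by omega)
      rw [hkk, hch]
      have : ((t.toNat : ℕ) < Nat.choose s.toNat k.toNat) ↔ (t < (Nat.choose s.toNat k.toNat : Int)) := by
        omega
      simp [this]

-- monotonicity in the pool size
lemma exceeds_mono (k t s s' : Int) (ht : 1 ≤ t) (hss : s ≤ s')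
    (h : pvNCKExceeds s k t = true) : pvNCKExceeds s' k t = true := by
  rw [exceeds_eq s k t ht] at h
  rw [exceeds_eq s' k t ht]
  simp only [decide_eq_true_eq] at h ⊢
  unfold chooseZ at h ⊢
  by_cases hc : 0 ≤ k ∧ k ≤ s
  · rw [if_pos hc] at h
    rw [if_pos ⟨hc.1, by omega⟩]
    have := Nat.choose_le_choose k.toNat (show s.toNat ≤ s'.toNat by omega)
    omega
  · rw [if_neg hc] at h; simp at h; omega

lemma exceeds_at_k (k t : Int) (ht : 1 ≤ t) : pvNCKExceeds k k t = false := by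
  rw [exceeds_eq k k t ht]
  unfold chooseZ
  by_cases hk : 0 ≤ k
  · rw [if_pos ⟨hk, le_refl k⟩]; simp; omega
  · rw [if_neg (by omega)]; simp; omega

-- B's helper agrees with A's for positive threshold
lemma cnk_eq (s k t : Int) (ht : 1 ≤ t) : pvCnkExceeds s k t = pvNCKExceeds s k t := by
  rw [pvCnkExceeds, pvNCKExceeds, if_neg (by omega)]
  by_cases hbad : k < 0 ∨ s < 0 ∨ k > s
  · rw [if_pos hbad]
    have hneg : min k (s - k) < 0 := by omega
    rw [pvLoopB]
    rw [dif_neg (by omega)]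
    simp; omega
  · rw [if_neg hbad]
    push_neg at hbad
    by_cases hz : min k (s - k) = 0
    · rw [if_pos hz, hz]
      rw [pvLoopB, dif_neg (by omega)]
    · rw [if_neg hz]
      exact (loopAB (min k (s - k)).toNat s (min k (s - k)) t 1 1 (by omega) (by omega)).symm

-- full characterisation of A's while loop
lemma whileA_spec (k t : Int) (ht : 1 ≤ t) (size : Int) (hks : k ≤ size) :
    k ≤ pvWhileA k t size ∧ pvWhileA k t size ≤ size ∧
    pvNCKExceeds (pvWhileA k t size) k t = false ∧
    (pvWhileA k t size < size → pvNCKExceeds (pvWhileA k t size + 1) k t = true) := by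
  fun_induction pvWhileA k t size with
  | case1 size hcond ih =>
      obtain ⟨h1, h2, h3, h4⟩ := ih (by omega)
      refine ⟨h1, by omega, h3, ?_⟩
      intro _
      by_cases hlt : pvWhileA k t (size - 1) < size - 1
      · exact h4 hlt
      · have : pvWhileA k t (size - 1) + 1 = size := by omega
        rw [this]; exact hcond.2
  | case2 size hcond =>
      push_neg at hcond
      refine ⟨hks, le_refl _, ?_, by omega⟩
      by_cases hgt : size > k
      · have := hcond hgt; simpa using this
      · have : size = k := by omega
        rw [this]; exact exceeds_at_k k t ht

-- full characterisation of B's binary search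
lemma bsearch_spec (k t : Int) (ht : 1 ≤ t) :
    ∀ lo hi : Int, lo < hi → pvNCKExceeds lo k t = false → pvNCKExceeds hi k t = true →
    lo ≤ pvBSearch k t lo hi ∧ pvBSearch k t lo hi < hi ∧
    pvNCKExceeds (pvBSearch k t lo hi) k t = false ∧
    pvNCKExceeds (pvBSearch k t lo hi + 1) k t = true := by
  intro lo hi
  fun_induction pvBSearch k t lo hi with
  | case1 lo hi hgap mid hmid ih =>
      intro _ hlo hhi
      have hmb := PySem.Int.floordiv_two_mid_bounds (show lo ≤ hi by omega)
      have hm : mid = PySem.Int.floordiv (lo + hi) 2 := rfl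
      rw [PySem.Int.floordiv_eq_ediv_of_pos (by norm_num)] at hm
      have hlomid : lo < mid := by omega
      have hmidhi : mid < hi := by omega
      rw [cnk_eq mid k t ht] at hmid
      obtain ⟨h1, h2, h3, h4⟩ := ih hlomid hlo hmid
      exact ⟨h1, by omega, h3, h4⟩
  | case2 lo hi hgap mid hmid ih =>
      intro _ hlo hhi
      have hm : mid = PySem.Int.floordiv (lo + hi) 2 := rfl
      rw [PySem.Int.floordiv_eq_ediv_of_pos (by norm_num)] at hm
      have hlomid : lo < mid := by omega
      have hmidhi : mid < hi := by omega
      rw [cnk_eq mid k t ht] at hmid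
      obtain ⟨h1, h2, h3, h4⟩ := ih hmidhi (by simpa using hmid) hhi
      exact ⟨by omega, h2, h3, h4⟩
  | case3 lo hi hgap =>
      intro hlh hlo hhi
      have : hi = lo + 1 := by omega
      exact ⟨le_refl _, by omega, hlo, by rw [← this]; exact hhi⟩

-- ===== VERDICT (by name: the statement is the Claim_ definition above) =====
theorem bounded_worker_pool_size_py_spec : Claim_equal_bounded_worker_pool_size_py := by
  intro tw hc mc _dom
  unfold Spec_bounded_worker_pool_size_py bounded_worker_pool_size_py bounded_worker_pool_size_py_alt
  by_cases h1 : tw ≤ hc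
  · simp [h1]
  · rw [if_neg h1, if_neg h1]
    by_cases h2 : mc ≤ 0
    · simp [h2]
    · rw [if_neg h2, if_neg h2]
      have ht : 1 ≤ mc := by omega
      have hhc : hc < tw := by omega
      rw [cnk_eq tw hc mc ht]
      by_cases hex : pvNCKExceeds tw hc mc = false
      · rw [if_pos hex]
        rw [pvWhileA, dif_neg (by simp [hex])]
        omega
      · rw [if_neg hex]
        have hex' : pvNCKExceeds tw hc mc = true := by
          cases h : pvNCKExceeds tw hc mc
          · exact absurd h hex
          · rfl
        obtain ⟨a1, a2, a3, a4⟩ := whileA_spec hc mc ht tw (by omega)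
        obtain ⟨b1, b2, b3, b4⟩ :=
          bsearch_spec hc mc ht hc tw hhc (exceeds_at_k hc mc ht) hex'
        set r := pvWhileA hc mc tw with hr
        set r2 := pvBSearch hc mc hc tw with hr2
        have hrlt : r < tw := by
          by_contra hge
          have : r = tw := by omega
          rw [this] at a3
          rw [a3] at hex'
          exact absurd hex' (by simp)
        have hrE : pvNCKExceeds (r + 1) hc mc = true := a4 hrlt
        have hreq : r = r2 := by
          by_contra hne
          rcases (by omega : r < r2 ∨ r2 < r) with hlt | hlt
          · have := exceeds_mono hc mc (r + 1) r2 ht (by omega) hrE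
            rw [this] at b3; exact absurd b3 (by simp)
          · have := exceeds_mono hc mc (r2 + 1) r ht (by omega) b4
            rw [this] at a3; exact absurd a3 (by simp)
        rw [hreq]
        omega
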